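-- pv_equiv track=rewrite | github.com/LukaLambrecht/SudokuSolver | sudokusolver.py | groupisvalid
-- ===== SOURCE A (Python) =====
-- def groupisvalid(group):
--     # help function for isvalid; check if a group does not contain any contradictions; zeros are ignored.
--     containslist = []
--     for i in group:
--         if i == 0:
--             continue
--         if i in containslist:
--             return False
--         else:
--             containslist.append(i)
--     return True
-- ===== SOURCE B (Python) =====
-- def groupisvalid(group):
--     # Collect nonzero entries once; a duplicate exists iff the set is smaller.
--     nonzeros = [i for i in group if i != 0]
--     return len(nonzeros) == len(set(nonzeros))
-- ===== Notes on version B (the rewrite author's own statement) =====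
-- stated objective: simpler
-- what changed: Replaces the incremental seen-list with early return by one filtering pass plus a cardinality comparison between the nonzero list and its set.
import Mathlib
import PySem

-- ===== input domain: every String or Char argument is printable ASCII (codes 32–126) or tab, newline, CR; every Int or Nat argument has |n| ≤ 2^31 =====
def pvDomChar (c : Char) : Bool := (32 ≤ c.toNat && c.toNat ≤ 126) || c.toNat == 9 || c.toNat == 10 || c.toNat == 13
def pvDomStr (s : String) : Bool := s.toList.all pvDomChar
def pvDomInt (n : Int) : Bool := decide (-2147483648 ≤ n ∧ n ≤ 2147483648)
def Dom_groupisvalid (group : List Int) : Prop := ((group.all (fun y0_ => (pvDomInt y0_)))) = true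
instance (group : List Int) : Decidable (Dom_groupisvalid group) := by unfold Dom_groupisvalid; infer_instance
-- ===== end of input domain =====

-- B replaces A's incremental seen-list with an early return by a single filter plus a
-- cardinality comparison between the nonzero list and its set (objective: simpler).

-- ===== PORT A =====
def groupisvalidAux : List Int → List Int → Bool
  | [], _ => true
  | i :: rest, containslist =>
      if i = 0 then groupisvalidAux rest containslist
      else if containslist.contains i then false
      else groupisvalidAux rest (containslist ++ [i])

def groupisvalid (group : List Int) : Bool := groupisvalidAux group []

-- ===== PORT B =====
def groupisvalid_alt (group : List Int) : Bool :=
  let nonzeros := group.filter (fun i => i != 0)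
  nonzeros.length == (PySem.Set.ofList nonzeros).length

-- ===== PRECONDITION & SPEC =====
def Spec_groupisvalid (group : List Int) (out : Bool) : Prop := out = groupisvalid_alt group
instance (group : List Int) (out : Bool) : Decidable (Spec_groupisvalid group out) := by unfold Spec_groupisvalid; infer_instance

-- ===== CLAIM (what is proved, stated in full; the proofs are below) =====
def Claim_equal_groupisvalid : Prop := ∀ (group : List Int), Dom_groupisvalid group → Spec_groupisvalid group (groupisvalid group)

-- ===== LEMMAS AND PROOFS =====

-- ===== VERDICT (by name: the statement is the Claim_ definition above) =====
-- A's loop characterised: true iff the nonzero entries are distinct and none already seen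
theorem aux_char (l c : List Int) :
    groupisvalidAux l c =
      decide ((l.filter (fun i => i != 0)).Nodup ∧ ∀ x ∈ l, x ≠ 0 → x ∉ c) := by
  induction l generalizing c with
  | nil => simp [groupisvalidAux]
  | cons i rest ih =>
    by_cases hz : i = 0
    · subst hz
      simp [groupisvalidAux, ih]
    · by_cases hc : i ∈ c
      · simp [groupisvalidAux, hz, hc]
      · simp only [groupisvalidAux, if_neg hz, List.contains_eq_mem, decide_eq_true_eq,
          if_neg hc, ih]
        rw [decide_eq_decide]
        simp only [List.filter_cons, bne_iff_ne, ne_eq, hz, not_false_eq_true, if_true, List.nodup_cons, List.mem_filter, List.mem_cons, List.mem_append]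
        constructor
        · rintro ⟨hn, hall⟩
          refine ⟨⟨fun h => ?_, hn⟩, fun x hx hx0 => ?_⟩
          · have := hall i h.1 hz; tauto
          · rcases hx with rfl | hx
            · exact hc
            · have := hall x hx hx0; tauto
        · rintro ⟨⟨hni, hn⟩, hall⟩
          refine ⟨hn, fun x hx hx0 hmem => ?_⟩
          rcases hmem with hxc | hxi
          · exact hall x (Or.inr hx) hx0 hxc
          · rcases hxi with rfl | h
            · exact hni ⟨hx, trivial⟩
            · simp at h

-- B's cardinality test characterised: equal lengths iff no duplicates
theorem ofList_len_char (xs : List Int) :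
    (xs.length == (PySem.Set.ofList xs).length) = decide xs.Nodup := by
  induction xs with
  | nil => simp [PySem.Set.ofList_nil]
  | cons x xs ih =>
    rw [PySem.Set.ofList_cons]
    by_cases hx : x ∈ xs
    · have hle := PySem.Set.length_ofList_le xs
      have hlt : (PySem.Set.discard (PySem.Set.ofList xs) x).length
          < (PySem.Set.ofList xs).length :=
        List.length_filter_lt_length_iff_exists.mpr
          ⟨x, (PySem.Set.mem_ofList _ _).mpr hx, by simp⟩
      have hL : (((x :: xs).length : Nat) ==
          (x :: PySem.Set.discard (PySem.Set.ofList xs) x).length) = false := by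
        simp only [List.length_cons, beq_eq_false_iff_ne, ne_eq]
        omega
      have hR : decide ((x :: xs).Nodup) = false := by simp [List.nodup_cons, hx]
      rw [hL, hR]
    · have hd : PySem.Set.discard (PySem.Set.ofList xs) x = PySem.Set.ofList xs := by
        apply List.filter_eq_self.mpr
        intro y hy
        have hyx : y ∈ xs := (PySem.Set.mem_ofList _ _).mp hy
        exact bne_iff_ne.mpr (fun h => hx (h ▸ hyx))
      rw [hd]
      have hR : decide ((x :: xs).Nodup) = decide xs.Nodup := by
        simp [List.nodup_cons, hx]
      rw [hR, ← ih]
      show ((xs.length + 1 : Nat) == (PySem.Set.ofList xs).length + 1)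
        = (xs.length == (PySem.Set.ofList xs).length)
      cases h : (xs.length == (PySem.Set.ofList xs).length) <;> simp_all

-- ===== VERDICT (by name: the statement is the Claim_ definition above) =====
theorem groupisvalid_spec : Claim_equal_groupisvalid := by
  intro group _
  show groupisvalid group = groupisvalid_alt group
  unfold groupisvalid groupisvalid_alt
  rw [aux_char, ofList_len_char]
  simp
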